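-- pv_equiv track=rewrite | github.com/stxue1/graphene | scheduler.py | _find_latest_before
-- ===== SOURCE A (Python) =====
-- def _find_latest_before(sorted_times: list[int], timestamp: int) -> int:
--     left, right = 0, len(sorted_times) - 1
--     latest_before = 0
--
--     while left <= right:
--         mid = int((left + right) / 2)
--         if sorted_times[mid] < timestamp:
--             latest_before = sorted_times[mid]
--             left = mid + 1
--         else:
--             right = mid - 1
--     return latest_before
-- ===== SOURCE B (Python) =====
-- def _find_latest_before(sorted_times: list[int], timestamp: int) -> int:
--     latest_before = 0
--     for t in sorted_times:
--         if t < timestamp: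
--             latest_before = t
--     return latest_before
-- ===== Notes on version B (the rewrite author's own statement) =====
-- stated objective: simpler
-- what changed: Replaces the binary search with a single linear pass that keeps the last element strictly below the timestamp; Pre_ excludes unsorted lists with elements on both sides of the timestamp, where A's binary-search result is an artefact of the probing order.
-- outside the precondition, e.g. on _find_latest_before([5, 1], 3): A returns 0, B returns 1
import Mathlib
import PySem

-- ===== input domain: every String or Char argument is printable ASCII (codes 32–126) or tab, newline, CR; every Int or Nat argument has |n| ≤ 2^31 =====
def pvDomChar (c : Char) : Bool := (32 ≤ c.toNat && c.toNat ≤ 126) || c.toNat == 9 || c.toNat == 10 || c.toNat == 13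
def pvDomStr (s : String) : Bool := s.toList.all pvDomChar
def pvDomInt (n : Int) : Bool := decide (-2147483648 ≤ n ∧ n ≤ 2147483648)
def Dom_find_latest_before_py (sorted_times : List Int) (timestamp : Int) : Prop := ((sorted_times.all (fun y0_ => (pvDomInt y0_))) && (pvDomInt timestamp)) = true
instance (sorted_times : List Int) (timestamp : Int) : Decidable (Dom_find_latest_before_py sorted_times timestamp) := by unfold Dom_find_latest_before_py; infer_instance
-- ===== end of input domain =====

-- B replaces A's binary search by a single linear pass keeping the last element < timestamp (simpler).

-- ===== PORT A =====
-- midpoint bounds, cited by the loop's decreasing_by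
lemma pv_tdiv2_bounds (l r : Int) (h : l ≤ r) : l ≤ (l + r).tdiv 2 ∧ (l + r).tdiv 2 ≤ r := by
  by_cases h0 : 0 ≤ l + r
  · rw [Int.tdiv_eq_ediv_of_nonneg h0]; omega
  · have e : (l + r).tdiv 2 = -((-(l + r)).tdiv 2) := by rw [Int.neg_tdiv]; ring
    rw [e, Int.tdiv_eq_ediv_of_nonneg (by omega)]; omega

-- the while-loop of A; the `none` branch (Python IndexError) is unreachable for the states A reaches
def pvALoop (sorted_times : List Int) (timestamp : Int) (left right latest : Int) : Int :=
  if _h : left ≤ right then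
    let mid := (left + right).tdiv 2   -- int((left + right) / 2): truncation toward zero
    match PySem.List.pyGet? sorted_times mid with
    | some v =>
      if v < timestamp then pvALoop sorted_times timestamp (mid + 1) right v
      else pvALoop sorted_times timestamp left (mid - 1) latest
    | none => latest
  else latest
termination_by (right + 1 - left).toNat
decreasing_by all_goals (have := pv_tdiv2_bounds left right (by omega); omega)

def find_latest_before_py (sorted_times : List Int) (timestamp : Int) : Int :=
  pvALoop sorted_times timestamp 0 ((sorted_times.length : Int) - 1) 0

-- ===== PORT B =====
def find_latest_before_py_alt (sorted_times : List Int) (timestamp : Int) : Int :=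
  sorted_times.foldl (fun latest t => if t < timestamp then t else latest) 0

-- ===== PRECONDITION & SPEC =====
-- Pre_ excludes unsorted lists whose elements fall on both sides of timestamp: the contract is a
-- sorted list (the parameter is literally named sorted_times), and on such unsorted lists A's
-- binary-search result is an artefact of the probing order and no value there is specified
-- (when all elements lie on one side of timestamp both programs agree even unsorted, so those stay in).
def Pre_find_latest_before_py (sorted_times : List Int) (timestamp : Int) : Prop :=
  List.Pairwise (· ≤ ·) sorted_times ∨ (∀ t ∈ sorted_times, timestamp ≤ t) ∨ (∀ t ∈ sorted_times, t < timestamp)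
instance (sorted_times : List Int) (timestamp : Int) : Decidable (Pre_find_latest_before_py sorted_times timestamp) := by unfold Pre_find_latest_before_py; infer_instance
def pvWitness_find_latest_before_py : List Int × Int := ([1, 2, 3], 3)

def Spec_find_latest_before_py (sorted_times : List Int) (timestamp : Int) (out : Int) : Prop := out = find_latest_before_py_alt sorted_times timestamp
instance (sorted_times : List Int) (timestamp : Int) (out : Int) : Decidable (Spec_find_latest_before_py sorted_times timestamp out) := by unfold Spec_find_latest_before_py; infer_instance

-- ===== CLAIM (what is proved, stated in full; the proofs are below) =====
def Claim_equal_find_latest_before_py : Prop := ∀ (sorted_times : List Int) (timestamp : Int), Dom_find_latest_before_py sorted_times timestamp → Pre_find_latest_before_py sorted_times timestamp → Spec_find_latest_before_py sorted_times timestamp (find_latest_before_py sorted_times timestamp)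

-- ===== LEMMAS AND PROOFS =====

-- folding B's step over elements all ≥ timestamp leaves the accumulator unchanged
lemma pv_fold_skip (timestamp : Int) (ys : List Int) (acc : Int)
    (h : ∀ y ∈ ys, ¬ y < timestamp) :
    ys.foldl (fun latest t => if t < timestamp then t else latest) acc = acc := by
  induction ys generalizing acc with
  | nil => rfl
  | cons y ys ih =>
      simp only [List.foldl_cons, if_neg (h y (by simp))]
      exact ih acc (fun z hz => h z (by simp [hz]))

-- loop invariant: latest equals B's fold over the prefix before `left`, and every element past `right` is ≥ timestamp
lemma pv_loop_eq (xs : List Int) (ts : Int) (hs : List.Pairwise (· ≤ ·) xs) :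
    ∀ (left right latest : Int),
      0 ≤ left → right ≤ (xs.length : Int) - 1 → left - 1 ≤ right →
      (xs.take left.toNat).foldl (fun latest t => if t < ts then t else latest) 0 = latest →
      (∀ i : Nat, (hi : i < xs.length) → right < (i : Int) → ¬ xs[i] < ts) →
      pvALoop xs ts left right latest
        = xs.foldl (fun latest t => if t < ts then t else latest) 0 := by
  intro left right latest hl hr hlr hpre hpost
  rw [pvALoop]
  by_cases h : left ≤ right
  · obtain ⟨hmid1, hmid2⟩ := pv_tdiv2_bounds left right h
    set mid := (left + right).tdiv 2 with hmiddef
    have hmnat : (mid.toNat : Int) = mid := by omega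
    have hml : mid.toNat < xs.length := by omega
    have hget : PySem.List.pyGet? xs mid = some xs[mid.toNat] := by
      have e := PySem.List.pyGet?_natCast (xs := xs) (n := mid.toNat)
      rw [hmnat] at e
      rw [e, List.getElem?_eq_getElem hml]
    simp only [dif_pos h, hget]
    by_cases hv : xs[mid.toNat] < ts
    · rw [if_pos hv]
      refine pv_loop_eq xs ts hs (mid + 1) right xs[mid.toNat] (by omega) hr (by omega) ?_ hpost
      have htake : xs.take (mid + 1).toNat = xs.take mid.toNat ++ [xs[mid.toNat]] := by
        have e : (mid + 1).toNat = mid.toNat + 1 := by omega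
        rw [e, List.take_add_one, List.getElem?_eq_getElem hml]
        rfl
      rw [htake, List.foldl_append]
      simp [hv]
    · rw [if_neg hv]
      refine pv_loop_eq xs ts hs left (mid - 1) latest hl (by omega) (by omega) hpre ?_
      intro i hi2 hi1
      by_cases hi3 : right < (i : Int)
      · exact hpost i hi2 hi3
      · have hmi : mid.toNat ≤ i := by omega
        rcases Nat.eq_or_lt_of_le hmi with heq | hlt
        · simpa [← heq] using hv
        · have := List.pairwise_iff_getElem.mp hs mid.toNat i hml hi2 hlt
          omega
  · simp only [dif_neg h]
    -- exit: everything from index left.toNat on is ≥ ts, so B's fold over the tail keeps latest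
    have hsplit : xs = xs.take left.toNat ++ xs.drop left.toNat := (List.take_append_drop _ _).symm
    conv_rhs => rw [hsplit]
    rw [List.foldl_append, hpre]
    refine (pv_fold_skip ts _ latest ?_).symm
    intro y hy
    obtain ⟨j, hj, hjy⟩ := List.getElem_of_mem hy
    have hjl : j < xs.length - left.toNat := by simpa [List.length_drop] using hj
    have hjlen : left.toNat + j < xs.length := by omega
    have e : y = xs[left.toNat + j] := by rw [← hjy, List.getElem_drop]
    rw [e]
    exact hpost (left.toNat + j) hjlen (by omega)
termination_by left right _ => (right + 1 - left).toNat
decreasing_by all_goals omega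

-- if every probed element is ≥ timestamp, A's loop never updates latest
lemma pv_loop_skip (xs : List Int) (ts : Int) (h : ∀ t ∈ xs, ¬ t < ts) :
    ∀ (left right latest : Int), pvALoop xs ts left right latest = latest := by
  intro left right latest
  rw [pvALoop]
  by_cases hc : left ≤ right
  · obtain ⟨hmid1, hmid2⟩ := pv_tdiv2_bounds left right hc
    simp only [dif_pos hc]
    cases hget : PySem.List.pyGet? xs ((left + right).tdiv 2) with
    | none => rfl
    | some v =>
        show (if v < ts then pvALoop xs ts ((left + right).tdiv 2 + 1) right v
              else pvALoop xs ts left ((left + right).tdiv 2 - 1) latest) = latest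
        rw [if_neg (h v (PySem.List.mem_of_pyGet?_eq_some xs hget))]
        exact pv_loop_skip xs ts h left ((left + right).tdiv 2 - 1) latest
  · rw [dif_neg hc]
termination_by left right _ => (right + 1 - left).toNat
decreasing_by all_goals omega

-- if every element is < timestamp, A's loop starting at right = len-1 ends on the last element
lemma pv_loop_all_lt (xs : List Int) (ts : Int) (h : ∀ t ∈ xs, t < ts) (hne : xs ≠ []) :
    ∀ (left latest : Int), 0 ≤ left → left ≤ (xs.length : Int) - 1 →
      pvALoop xs ts left ((xs.length : Int) - 1) latest
        = xs.getLast hne := by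
  intro left latest hl hr
  rw [pvALoop]
  obtain ⟨hmid1, hmid2⟩ := pv_tdiv2_bounds left ((xs.length : Int) - 1) hr
  set mid := (left + ((xs.length : Int) - 1)).tdiv 2 with hmiddef
  have hmnat : (mid.toNat : Int) = mid := by omega
  have hml : mid.toNat < xs.length := by omega
  have hget : PySem.List.pyGet? xs mid = some xs[mid.toNat] := by
    have e := PySem.List.pyGet?_natCast (xs := xs) (n := mid.toNat)
    rw [hmnat] at e
    rw [e, List.getElem?_eq_getElem hml]
  simp only [dif_pos hr, hget, if_pos (h _ (List.getElem_mem hml))]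
  by_cases hend : mid + 1 ≤ (xs.length : Int) - 1
  · exact pv_loop_all_lt xs ts h hne (mid + 1) xs[mid.toNat] (by omega) hend
  · rw [pvALoop, dif_neg (by omega)]
    have : mid.toNat = xs.length - 1 := by omega
    rw [List.getLast_eq_getElem]
    simp [this]
termination_by left _ => ((xs.length : Int) - left).toNat
decreasing_by all_goals omega

-- B's fold over a nonempty list of elements all < timestamp returns the last element
lemma pv_fold_all_lt (ts : Int) (ys : List Int) (h : ∀ t ∈ ys, t < ts) (hne : ys ≠ []) :
    ∀ acc : Int, ys.foldl (fun latest t => if t < ts then t else latest) acc = ys.getLast hne := by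
  induction ys with
  | nil => exact absurd rfl hne
  | cons y ys ih =>
      intro acc
      cases ys with
      | nil => simp [if_pos (h y (by simp))]
      | cons z zs =>
          rw [List.foldl_cons,
              ih (fun t ht => h t (List.mem_cons_of_mem y ht)) (by simp)]
          exact (List.getLast_cons (by simp)).symm

-- ===== VERDICT (by name: the statement is the Claim_ definition above) =====
theorem find_latest_before_py_spec : Claim_equal_find_latest_before_py := by
  intro xs ts _hdom hpre
  unfold Spec_find_latest_before_py find_latest_before_py find_latest_before_py_alt
  rcases hpre with hs | hge | hlt
  · exact pv_loop_eq xs ts hs 0 ((xs.length : Int) - 1) 0 le_rfl le_rfl (by omega)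
      (by simp) (by intro i hi2 hi1; omega)
  · rw [pv_loop_skip xs ts (fun t ht => not_lt.mpr (hge t ht)),
        pv_fold_skip ts xs 0 (fun t ht => not_lt.mpr (hge t ht))]
  · cases hxe : xs with
    | nil => rw [pvALoop]; norm_num
    | cons x xs' =>
        subst hxe
        have hne : x :: xs' ≠ [] := by simp
        rw [pv_loop_all_lt _ ts hlt hne 0 0 le_rfl (by simp),
            pv_fold_all_lt ts _ hlt hne 0]
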